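-- pv_equiv track=rewrite | github.com/fords/_Practice_ | duplicate_items.py | duplicate_items
-- ===== SOURCE A (Python) =====
-- def duplicate_items(list_numbers):
--     list_res = []
--     list_numbers.sort()
--     for i in range(0,len(list_numbers)):
--         list1 = list_numbers.pop(0)
--         if list1 in list_numbers:
--             list_res.append(list1)
--     return list_res
-- ===== SOURCE B (Python) =====
-- # Counting-dict re-implementation; NOTE: unlike A, B does not mutate list_numbers
-- # (A empties it); equivalence is about the return value only.
-- def duplicate_items(list_numbers):
--     counts = {}
--     for x in list_numbers:
--         counts[x] = counts.get(x, 0) + 1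
--     res = []
--     for v in sorted(counts):
--         res += [v] * (counts[v] - 1)
--     return res
-- ===== Notes on version B (the rewrite author's own statement) =====
-- stated objective: faster
-- what changed: A repeatedly pops the front of the sorted list and scans the remainder for membership (quadratic); B builds a count dictionary in one pass and emits each sorted distinct value count-1 times, removing the inner scan; B does not mutate list_numbers (A empties it), the equivalence is about the return value.
import Mathlib
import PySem

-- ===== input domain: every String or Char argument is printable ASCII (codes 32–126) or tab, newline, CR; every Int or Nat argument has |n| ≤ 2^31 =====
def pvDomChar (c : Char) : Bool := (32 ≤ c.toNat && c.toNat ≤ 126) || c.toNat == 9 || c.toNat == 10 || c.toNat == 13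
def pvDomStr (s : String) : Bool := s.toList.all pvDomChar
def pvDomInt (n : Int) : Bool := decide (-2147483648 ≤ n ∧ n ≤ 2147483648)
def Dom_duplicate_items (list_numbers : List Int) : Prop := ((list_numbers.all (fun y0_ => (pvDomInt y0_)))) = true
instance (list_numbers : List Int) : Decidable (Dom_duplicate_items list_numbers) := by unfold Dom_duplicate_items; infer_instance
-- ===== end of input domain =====

-- B replaces A's pop-and-rescan loop by a single counting pass plus an emission pass over the
-- sorted distinct values (objective: faster). A empties its argument in place, B does not mutate;
-- the equivalence proved here is about the RETURN value only.

-- ===== PORT A =====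
-- A: sort, then for i in range(0, len): pop(0) and test membership in the remainder.
def duplicate_items (list_numbers : List Int) : List Int :=
  let sortedL := PySem.List.sorted list_numbers (fun x => x) false
  let st :=
    (PySem.List.pyRange 0 (sortedL.length : Int) 1).foldl
      (fun (st : List Int × List Int) _ =>
        match PySem.List.pop? st.1 0 with
        | none => st  -- IndexError: unreachable (the loop pops exactly length-many times)
        | some (x, rest) => if x ∈ rest then (rest, st.2 ++ [x]) else (rest, st.2))
      (sortedL, [])
  st.2

-- ===== PORT B =====
-- B: counts[x] = counts.get(x, 0) + 1 over the list, then res += [v] * (counts[v] - 1) for v in sorted(counts).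
def duplicate_items_alt (list_numbers : List Int) : List Int :=
  let counts : PySem.Dict Int Int :=
    list_numbers.foldl (fun d x => d.modify x 0 (· + 1)) PySem.Dict.empty
  (PySem.List.sorted counts.keys (fun v => v) false).foldl
    (fun res v => res ++ List.replicate (PySem.Dict.getD counts v 0 - 1).toNat v) []

-- ===== PRECONDITION & SPEC =====
def Spec_duplicate_items (list_numbers : List Int) (out : List Int) : Prop := out = duplicate_items_alt list_numbers
instance (list_numbers : List Int) (out : List Int) : Decidable (Spec_duplicate_items list_numbers out) := by unfold Spec_duplicate_items; infer_instance

-- ===== CLAIM (what is proved, stated in full; the proofs are below) =====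
def Claim_equal_duplicate_items : Prop := ∀ (list_numbers : List Int), Dom_duplicate_items list_numbers → Spec_duplicate_items list_numbers (duplicate_items list_numbers)

-- ===== LEMMAS AND PROOFS =====

-- What A's pop-loop computes on a list: the elements that reappear in their own tail, in order.
def dupMem : List Int → List Int
  | [] => []
  | x :: r => (if x ∈ r then [x] else []) ++ dupMem r

theorem dupMem_sublist (l : List Int) : (dupMem l).Sublist l := by
  induction l with
  | nil => simp [dupMem]
  | cons x r ih =>
    by_cases h : x ∈ r
    · simpa [dupMem, h] using ih.cons₂ x
    · simpa [dupMem, h] using ih.cons x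

theorem count_dupMem (l : List Int) (v : Int) :
    (dupMem l).count v = l.count v - 1 := by
  induction l with
  | nil => simp [dupMem]
  | cons x r ih =>
    by_cases hx : x = v
    · subst hx
      by_cases h : x ∈ r
      · have h1 : 1 ≤ r.count x := List.count_pos_iff.mpr h
        have hstep : (dupMem (x :: r)).count x = (dupMem r).count x + 1 := by
          simp [dupMem, h]
        rw [hstep, ih, List.count_cons_self]
        omega
      · have h0 : r.count x = 0 := List.count_eq_zero.mpr h
        have hstep : (dupMem (x :: r)).count x = (dupMem r).count x := by
          simp [dupMem, h]
        rw [hstep, ih, List.count_cons_self]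
        omega
    · have hstep : (dupMem (x :: r)).count v = (dupMem r).count v := by
        by_cases h : x ∈ r <;> simp [dupMem, h, hx]
      rw [hstep, ih, List.count_cons_of_ne (fun hh => hx hh)]

theorem a_loop (idxs : List Int) : ∀ (l acc : List Int), idxs.length = l.length →
    idxs.foldl
      (fun (st : List Int × List Int) _ =>
        match PySem.List.pop? st.1 0 with
        | none => st
        | some (x, rest) => if x ∈ rest then (rest, st.2 ++ [x]) else (rest, st.2))
      (l, acc) = ([], acc ++ dupMem l) := by
  induction idxs with
  | nil =>
    intro l acc h
    cases l with
    | nil => simp [dupMem]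
    | cons x r => simp at h
  | cons i t ih =>
    intro l acc h
    cases l with
    | nil => simp at h
    | cons x r =>
      simp only [List.foldl_cons, PySem.List.pop?_zero_cons]
      by_cases hm : x ∈ r <;> simp only [hm, if_pos, if_neg, dupMem, not_false_iff] <;>
        [rw [ih r (acc ++ [x]) (by simpa using h)]; rw [ih r acc (by simpa using h)]] <;>
        simp

theorem count_flatMap_replicate (ks : List Int) (n : Int → Nat) (v : Int) (hnd : ks.Nodup) :
    (ks.flatMap (fun k => List.replicate (n k) k)).count v
      = if v ∈ ks then n v else 0 := by
  induction ks with
  | nil => simp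
  | cons k t ih =>
    have hnd' := hnd
    simp only [List.nodup_cons] at hnd'
    simp only [List.flatMap_cons, List.count_append, ih hnd'.2, List.count_replicate]
    by_cases hv : v = k
    · subst hv
      simp [hnd'.1]
    · simp [hv, Ne.symm hv]

theorem pairwise_le_flatMap_replicate (ks : List Int) (n : Int → Nat)
    (h : ks.Pairwise (· < ·)) :
    (ks.flatMap (fun k => List.replicate (n k) k)).Pairwise (· ≤ ·) := by
  induction ks with
  | nil => simp
  | cons k t ih =>
    simp only [List.pairwise_cons] at h
    simp only [List.flatMap_cons]
    refine List.pairwise_append.mpr ⟨List.pairwise_replicate.mpr (by simp), ih h.2, ?_⟩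
    intro a ha b hb
    have ha' : a = k := List.eq_of_mem_replicate ha
    have hb' : ∃ m ∈ t, b = m := by
      simp only [List.mem_flatMap] at hb
      obtain ⟨m, hm, hbm⟩ := hb
      exact ⟨m, hm, List.eq_of_mem_replicate hbm⟩
    obtain ⟨m, hm, hbm⟩ := hb'
    rw [ha', hbm]
    exact le_of_lt (h.1 m hm)

-- the core identity: adjacent-in-tail duplicates of the sorted list = sorted distinct values, each count-1 times
theorem dupMem_sorted_eq (l : List Int) :
    dupMem (PySem.List.sorted l (fun x => x) false)
      = (PySem.List.sorted (PySem.Set.ofList l) (fun v => v) false).flatMap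
          (fun v => List.replicate (((l.count v : Int) - 1).toNat) v) := by
  set s := PySem.List.sorted l (fun x => x) false with hs
  set ks := PySem.List.sorted (PySem.Set.ofList l) (fun v => v) false with hks
  have hksnd : ks.Nodup :=
    (PySem.List.sorted_perm (PySem.Set.ofList l) (fun v => v) false).nodup_iff.mpr
      (PySem.Set.nodup_ofList l)
  have hkslt : ks.Pairwise (· < ·) := PySem.List.sorted_ofList_pairwise_lt l
  have hperm : (dupMem s).Perm
      (ks.flatMap (fun v => List.replicate (((l.count v : Int) - 1).toNat) v)) := by
    rw [List.perm_iff_count]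
    intro v
    rw [count_dupMem, count_flatMap_replicate _ _ _ hksnd]
    have hcs : s.count v = l.count v :=
      (PySem.List.sorted_perm l (fun x => x) false).count_eq v
    have hmem : v ∈ ks ↔ v ∈ l := by
      rw [hks, PySem.List.mem_sorted, PySem.Set.mem_ofList]
    by_cases hv : v ∈ l
    · rw [hcs, if_pos (hmem.mpr hv)]
      have : 1 ≤ l.count v := List.count_pos_iff.mpr hv
      omega
    · rw [hcs, if_neg (fun h => hv (hmem.mp h))]
      have : l.count v = 0 := List.count_eq_zero.mpr hv
      omega
  have hsort1 : (dupMem s).Pairwise (· ≤ ·) :=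
    List.Pairwise.sublist (dupMem_sublist s) (PySem.List.sorted_pairwise l (fun x => x))
  have hsort2 := pairwise_le_flatMap_replicate ks
      (fun v => ((l.count v : Int) - 1).toNat) hkslt
  exact List.Perm.eq_of_pairwise' hsort1 hsort2 hperm

-- ===== VERDICT (by name: the statement is the Claim_ definition above) =====
theorem duplicate_items_spec : Claim_equal_duplicate_items := by
  intro l _
  unfold Spec_duplicate_items duplicate_items duplicate_items_alt
  rw [← PySem.Dict.counter_eq_foldl]
  simp only [PySem.Dict.keys_counter]
  rw [PySem.List.foldl_append_eq_flatMap
    (g := fun v => List.replicate ((PySem.Dict.getD (PySem.Dict.counter l) v 0 - 1).toNat) v)]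
  have hlen : (PySem.List.pyRange 0 ((PySem.List.sorted l (fun x => x) false).length : Int) 1).length
      = (PySem.List.sorted l (fun x => x) false).length := by
    rw [PySem.List.length_pyRange_one]; simp
  rw [a_loop _ _ _ hlen]
  simp only [List.nil_append, dupMem_sorted_eq]
  congr 1
  funext v
  rw [PySem.Dict.getD_counter]
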